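-- pv_equiv track=rewrite | github.com/ylebovits/punnytt | pssFunctions.py | validate_letters
-- ===== SOURCE A (Python) =====
-- from string import ascii_lowercase
--
-- def validate_letters(first_string, second_string):
-- 	isvalid = True
-- 	# interate thru all lowercase letters
-- 	for string in [first_string, second_string]:
-- 		for letter in ascii_lowercase:
-- 			# if the letter is in the input, make sure it only occurs twice
-- 			if string.lower().count(letter) > 0 and string.lower().count(letter) != 2:
-- 				isvalid = False
-- 			else:
-- 				pass
--
-- 	return isvalid
-- ===== SOURCE B (Python) =====
-- from string import ascii_lowercase
-- from collections import Counter
--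
-- LETTERS = set(ascii_lowercase)
--
-- def _all_pairs(s):
--     counts = Counter(c for c in s.lower() if c in LETTERS)
--     return all(v == 2 for v in counts.values())
--
-- def validate_letters(first_string, second_string):
--     return _all_pairs(first_string) and _all_pairs(second_string)
-- ===== Notes on version B (the rewrite author's own statement) =====
-- stated objective: faster
-- what changed: Replaces the 2x26 per-letter .count() scans over the (re-lowered) string with a single Counter built in one pass over each lowered string, then checks every letter's multiplicity is exactly 2.
import Mathlib
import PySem

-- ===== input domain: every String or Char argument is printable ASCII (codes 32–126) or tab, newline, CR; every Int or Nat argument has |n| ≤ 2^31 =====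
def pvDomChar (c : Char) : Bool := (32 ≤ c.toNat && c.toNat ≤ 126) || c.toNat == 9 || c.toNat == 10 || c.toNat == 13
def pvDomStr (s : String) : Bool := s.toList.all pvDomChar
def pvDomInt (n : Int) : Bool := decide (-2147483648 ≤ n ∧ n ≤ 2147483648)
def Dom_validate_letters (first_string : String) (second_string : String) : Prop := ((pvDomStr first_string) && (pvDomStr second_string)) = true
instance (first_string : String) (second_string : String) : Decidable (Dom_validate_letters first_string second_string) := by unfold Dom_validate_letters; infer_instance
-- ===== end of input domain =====

-- B replaces A's 52 per-letter count() scans with one Counter pass per lowered string (objective: faster).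

-- ===== PORT A =====
def ascii_lowercase : String := "abcdefghijklmnopqrstuvwxyz"

def validate_letters (first_string : String) (second_string : String) : Bool :=
  [first_string, second_string].foldl
    (fun isvalid string =>
      ascii_lowercase.toList.foldl
        (fun isvalid letter =>
          if 0 < PySem.Str.count (PySem.Str.lower string) (String.singleton letter) ∧
             PySem.Str.count (PySem.Str.lower string) (String.singleton letter) ≠ 2
          then false else isvalid)
        isvalid)
    true

-- ===== PORT B =====
def pvLETTERS : PySem.Set Char := PySem.Set.ofList ascii_lowercase.toList

def all_pairs (s : String) : Bool :=
  let counts := PySem.Dict.counter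
    ((PySem.Str.lower s).toList.filter (fun c => PySem.Set.contains pvLETTERS c))
  counts.values.all (fun v => v == 2)

def validate_letters_alt (first_string : String) (second_string : String) : Bool :=
  all_pairs first_string && all_pairs second_string

-- ===== PRECONDITION & SPEC =====
def Spec_validate_letters (first_string : String) (second_string : String) (out : Bool) : Prop := out = validate_letters_alt first_string second_string
instance (first_string : String) (second_string : String) (out : Bool) : Decidable (Spec_validate_letters first_string second_string out) := by unfold Spec_validate_letters; infer_instance

-- ===== CLAIM (what is proved, stated in full; the proofs are below) =====
def Claim_equal_validate_letters : Prop := ∀ (first_string : String) (second_string : String), Dom_validate_letters first_string second_string → Spec_validate_letters first_string second_string (validate_letters first_string second_string)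

-- ===== LEMMAS AND PROOFS =====

-- Python's str.count with a one-character needle is the character count.
theorem count_go_singleton (c : Char) : ∀ (fuel : Nat) (l : List Char) (acc : Nat),
    l.length ≤ fuel → PySem.Chars.count.go [c] fuel l acc = acc + l.count c := by
  intro fuel
  induction fuel with
  | zero =>
    intro l acc h
    have : l = [] := List.length_eq_zero_iff.mp (Nat.le_zero.mp h)
    subst this
    simp [PySem.Chars.count.go]
  | succ n ih =>
    intro l acc h
    cases l with
    | nil => simp [PySem.Chars.count.go]
    | cons hd tl =>
      simp only [PySem.Chars.count.go, List.isPrefixOf, List.length_cons] at *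
      by_cases hc : c = hd
      · subst hc
        simp only [BEq.rfl, Bool.true_and, if_pos]
        simp only [List.length_nil, List.drop_zero, List.drop_succ_cons]
        rw [ih tl (acc + 1) (by omega)]
        simp
        omega
      · have hb : (c == hd) = false := by simp [hc]
        simp only [hb, Bool.false_and, if_neg, Bool.false_eq_true, not_false_iff]
        rw [ih tl acc (by omega)]
        have hb2 : (hd == c) = false := by simp; exact fun h => hc h.symm
        simp [List.count_cons, hb2]

theorem count_singleton (l : List Char) (c : Char) :
    PySem.Chars.count l [c] = l.count c := by
  simp only [PySem.Chars.count, List.isEmpty_cons, if_false, Bool.false_eq_true]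
  simpa using count_go_singleton c l.length l 0 le_rfl

-- A's inner loop: once isvalid is knocked to False it stays False.
theorem foldl_if_false {α : Type} (p : α → Prop) [DecidablePred p] (L : List α) :
    ∀ b : Bool, L.foldl (fun v x => if p x then false else v) b
      = (b && L.all fun x => !(decide (p x))) := by
  induction L with
  | nil => intro b; simp
  | cons hd tl ih =>
    intro b
    by_cases h : p hd
    · rw [List.foldl_cons, if_pos h, ih]
      simp [h]
    · rw [List.foldl_cons, if_neg h, ih]
      simp [h]

theorem contains_pvLETTERS (c : Char) :
    PySem.Set.contains pvLETTERS c = true ↔ c ∈ ascii_lowercase.toList := by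
  constructor
  · intro h
    have : c ∈ pvLETTERS := by
      simpa [PySem.Set.contains] using h
    simpa [pvLETTERS, PySem.Set.mem_ofList] using this
  · intro h
    have : c ∈ pvLETTERS := by
      simp [pvLETTERS, PySem.Set.mem_ofList, h]
    simpa [PySem.Set.contains] using this

-- The heart: A's 26-letter check over a char list equals B's counter check.
theorem az_check_eq (L : List Char) :
    (ascii_lowercase.toList.all fun letter =>
        !(decide (0 < L.count letter ∧ L.count letter ≠ 2)))
      = ((PySem.Set.ofList (L.filter (fun c => PySem.Set.contains pvLETTERS c))).all
          (fun k => (((L.filter (fun c => PySem.Set.contains pvLETTERS c)).count k : Int) == 2))) := by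
  set F := L.filter (fun c => PySem.Set.contains pvLETTERS c) with hF
  have hcount : ∀ k : Char, PySem.Set.contains pvLETTERS k = true → F.count k = L.count k := by
    intro k hk
    rw [hF]
    exact List.count_filter hk
  rw [Bool.eq_iff_iff]
  simp only [List.all_eq_true, Bool.not_eq_eq_eq_not, Bool.not_true, decide_eq_false_iff_not,
    beq_iff_eq]
  constructor
  · intro h k hk
    have hkF : k ∈ F := by simpa [PySem.Set.mem_ofList] using hk
    have hmem := List.mem_filter.mp (hF ▸ hkF)
    have hpos : 0 < L.count k := List.count_pos_iff.mpr hmem.1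
    have h2 := h k ((contains_pvLETTERS k).mp hmem.2)
    have : L.count k = 2 := by
      by_contra hne
      exact h2 ⟨hpos, hne⟩
    rw [hcount k hmem.2, this]
    simp
  · intro h letter hletter
    rintro ⟨hpos, hne⟩
    have hmemL : letter ∈ L := List.count_pos_iff.mp hpos
    have hcontains : PySem.Set.contains pvLETTERS letter = true :=
      (contains_pvLETTERS letter).mpr hletter
    have hmemF : letter ∈ F := by
      rw [hF]; exact List.mem_filter.mpr ⟨hmemL, hcontains⟩
    have := h letter (by simpa [PySem.Set.mem_ofList] using hmemF)
    rw [hcount letter hcontains] at this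
    exact hne (by exact_mod_cast this)

-- B's Counter check read off through items_counter.
theorem values_counter_all (F : List Char) :
    ((PySem.Dict.counter F).values.all (fun v => v == 2))
      = ((PySem.Set.ofList F).all (fun k => ((F.count k : Int) == 2))) := by
  simp only [PySem.Dict.values, PySem.Dict.items_counter, List.map_map, List.all_map]
  rfl

-- B's per-string check expressed without the Dict.
theorem all_pairs_eq (s : String) :
    all_pairs s
      = ((PySem.Set.ofList ((PySem.Chars.lower s.toList).filter (fun c => PySem.Set.contains pvLETTERS c))).all
          (fun k => ((((PySem.Chars.lower s.toList).filter (fun c => PySem.Set.contains pvLETTERS c)).count k : Int) == 2))) := by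
  simp only [all_pairs, PySem.Str.toList_lower]
  exact values_counter_all _

-- A's per-string pass equals B's per-string check.
theorem string_check_eq (s : String) (b : Bool) :
    (ascii_lowercase.toList.foldl
      (fun isvalid letter =>
        if 0 < PySem.Str.count (PySem.Str.lower s) (String.singleton letter) ∧
           PySem.Str.count (PySem.Str.lower s) (String.singleton letter) ≠ 2
        then false else isvalid) b)
      = (b && all_pairs s) := by
  rw [foldl_if_false (fun letter => 0 < PySem.Str.count (PySem.Str.lower s) (String.singleton letter) ∧
        PySem.Str.count (PySem.Str.lower s) (String.singleton letter) ≠ 2)]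
  have hc : ∀ letter : Char, PySem.Str.count (PySem.Str.lower s) (String.singleton letter)
      = (PySem.Chars.lower s.toList).count letter := by
    intro letter
    simp [PySem.Str.count_eq, PySem.Str.toList_lower, String.toList_singleton, count_singleton]
  simp only [hc]
  rw [az_check_eq, all_pairs_eq]

-- ===== VERDICT (by name: the statement is the Claim_ definition above) =====
theorem validate_letters_spec : Claim_equal_validate_letters := by
  intro first_string second_string _
  unfold Spec_validate_letters validate_letters validate_letters_alt
  simp only [List.foldl_cons, List.foldl_nil]
  rw [string_check_eq, string_check_eq]
  simp
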